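-- pv_equiv track=rewrite | github.com/songxiao1018/www | shenwang/test.py | find_min_diff_ribbons
-- ===== SOURCE A (Python) =====
-- def find_min_diff_ribbons(lists, num):
--     result = []
--     line_len_list = []
--     for k in range(num):
--         result.append([])
--         line_len_list.append(0)
--
--     for now_list in lists:
--         min_line = min(line_len_list)
--         min_num = line_len_list.index(min_line)
--         result[min_num].append(now_list)
--         line_len_list[min_num] += now_list
--         flag = True
--
--     return result
-- ===== SOURCE B (Python) =====
-- def find_min_diff_ribbons(lists, num):
--     # Keep a work-queue of (bin_sum, bin_index) pairs sorted ascending (lexicographic),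
--     # so the bin to fill is always at the front; reinsert it with its updated sum.
--     bins = [[] for _ in range(num)]
--     queue = [(0, i) for i in range(num)]
--     for x in lists:
--         s, i = queue[0]
--         queue = queue[1:]
--         bins[i].append(x)
--         p = (s + x, i)
--         j = 0
--         while j < len(queue) and queue[j] < p:
--             j += 1
--         queue.insert(j, p)
--     return bins
-- ===== Notes on version B (the rewrite author's own statement) =====
-- stated objective: alternative
-- what changed: Instead of rescanning the sums list with min() and .index() for every item, B keeps a queue of (sum, bin-index) pairs in ascending lexicographic order, pops the front (the least-loaded, lowest-index bin) and reinserts the pair with its updated sum.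
import Mathlib
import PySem

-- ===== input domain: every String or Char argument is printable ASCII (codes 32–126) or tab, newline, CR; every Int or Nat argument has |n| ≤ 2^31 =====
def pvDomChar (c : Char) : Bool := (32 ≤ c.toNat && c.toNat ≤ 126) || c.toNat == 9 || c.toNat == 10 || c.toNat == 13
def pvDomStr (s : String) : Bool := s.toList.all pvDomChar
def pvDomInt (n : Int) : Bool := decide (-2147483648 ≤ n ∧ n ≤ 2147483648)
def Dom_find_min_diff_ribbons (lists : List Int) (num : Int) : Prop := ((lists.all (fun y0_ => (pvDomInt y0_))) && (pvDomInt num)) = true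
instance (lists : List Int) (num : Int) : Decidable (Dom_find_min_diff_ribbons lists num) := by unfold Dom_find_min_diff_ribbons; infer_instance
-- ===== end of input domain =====

-- B replaces A's per-item full scan (min + .index over the sums list) by a queue of
-- (sum, index) pairs kept in ascending lexicographic order, popping the front and
-- reinserting the updated pair (objective: alternative algorithm, same exact output).

-- ===== PORT A =====
-- one step of A's main loop: min over sums, first index of that min, append there
def stepA (st : List (List Int) × List Int) (now : Int) : List (List Int) × List Int :=
  let min_line := (PySem.List.min? st.2 (fun y => y)).getD 0      -- min(line_len_list); getD unreachable under Pre_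
  let min_num  := (PySem.List.index? st.2 min_line).getD 0        -- line_len_list.index(min_line)
  (st.1.set min_num ((st.1.getD min_num []) ++ [now]),            -- result[min_num].append(now_list)
   st.2.set min_num ((st.2.getD min_num 0) + now))                -- line_len_list[min_num] += now_list

def find_min_diff_ribbons (lists : List Int) (num : Int) : List (List Int) :=
  -- for k in range(num): result.append([]); line_len_list.append(0)
  let init := (PySem.List.pyRange 0 num 1).foldl
    (fun (st : List (List Int) × List Int) _ => (st.1 ++ [([] : List Int)], st.2 ++ [(0 : Int)]))
    ([], [])
  (lists.foldl stepA init).1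

-- ===== PORT B =====
-- Python tuple comparison (s, i) < (t, j), lexicographic
def pairLt (p q : Int × Int) : Bool := p.1 < q.1 || (p.1 == q.1 && p.2 < q.2)

-- the while-loop + insert of Source B: insert p before the first element not < p
def insAsc (queue : List (Int × Int)) (p : Int × Int) : List (Int × Int) :=
  match queue with
  | [] => [p]
  | q :: qs => if pairLt q p then q :: insAsc qs p else p :: q :: qs

def stepB (st : List (List Int) × List (Int × Int)) (x : Int) : List (List Int) × List (Int × Int) :=
  match st.2 with
  | [] => st                                                      -- queue[0] raises IndexError in Python; outside Pre_
  | (s, i) :: rest =>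
    (st.1.set i.toNat ((st.1.getD i.toNat []) ++ [x]),            -- bins[i].append(x)
     insAsc rest (s + x, i))

def find_min_diff_ribbons_alt (lists : List Int) (num : Int) : List (List Int) :=
  let bins0 := (PySem.List.pyRange 0 num 1).map (fun _ => ([] : List Int))
  let q0 := (PySem.List.pyRange 0 num 1).map (fun i => ((0 : Int), i))
  (lists.foldl stepB (bins0, q0)).1

-- ===== PRECONDITION & SPEC =====
-- Pre_ excludes num ≤ 0 with a nonempty lists: there A calls min([]) and raises ValueError
-- (B's pop of an empty queue raises IndexError there too).
def Pre_find_min_diff_ribbons (lists : List Int) (num : Int) : Prop := 0 < num ∨ lists = []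
instance (lists : List Int) (num : Int) : Decidable (Pre_find_min_diff_ribbons lists num) := by
  unfold Pre_find_min_diff_ribbons; infer_instance

def pvWitness_find_min_diff_ribbons : List Int × Int := ([5, 2, 7, 2], 2)

def Spec_find_min_diff_ribbons (lists : List Int) (num : Int) (out : List (List Int)) : Prop := out = find_min_diff_ribbons_alt lists num
instance (lists : List Int) (num : Int) (out : List (List Int)) : Decidable (Spec_find_min_diff_ribbons lists num out) := by unfold Spec_find_min_diff_ribbons; infer_instance

-- ===== CLAIM (what is proved, stated in full; the proofs are below) =====
def Claim_equal_find_min_diff_ribbons : Prop := ∀ (lists : List Int) (num : Int), Dom_find_min_diff_ribbons lists num → Pre_find_min_diff_ribbons lists num → Spec_find_min_diff_ribbons lists num (find_min_diff_ribbons lists num)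

-- ===== LEMMAS AND PROOFS =====

-- (sums[m], m) pairs starting at index offset k
def pairsOf (l : List Int) (k : Int) : List (Int × Int) :=
  match l with
  | [] => []
  | s :: t => (s, k) :: pairsOf t (k + 1)

theorem length_pairsOf (l : List Int) (k : Int) : (pairsOf l k).length = l.length := by
  induction l generalizing k with
  | nil => rfl
  | cons s t ih => simp [pairsOf, ih]

theorem getElem_pairsOf (l : List Int) (k : Int) (m : Nat) (h : m < l.length) :
    (pairsOf l k)[m]'(by rw [length_pairsOf]; exact h) = (l[m], k + m) := by
  induction l generalizing k m with
  | nil => simp at h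
  | cons s t ih =>
    cases m with
    | zero => simp [pairsOf]
    | succ m =>
      simp only [pairsOf, List.getElem_cons_succ]
      rw [ih]
      · simp; ring
      · simpa using h

theorem pairsOf_set (l : List Int) (k : Int) (m : Nat) (v : Int) :
    pairsOf (l.set m v) k = (pairsOf l k).set m (v, k + m) := by
  induction l generalizing k m with
  | nil => rfl
  | cons s t ih =>
    cases m with
    | zero => simp [pairsOf]
    | succ m =>
      simp only [List.set_cons_succ, pairsOf, ih]
      have h2 : k + 1 + (m : Int) = k + ((m + 1 : Nat) : Int) := by push_cast; ring
      rw [h2]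

theorem mem_pairsOf (l : List Int) (k : Int) (p : Int × Int) (hp : p ∈ pairsOf l k) :
    ∃ m : Nat, ∃ h : m < l.length, p = (l[m], k + m) := by
  induction l generalizing k with
  | nil => simp [pairsOf] at hp
  | cons s t ih =>
    rcases List.mem_cons.mp hp with h | h
    · exact ⟨0, by simp, by simpa using h⟩
    · obtain ⟨m, hm, hpm⟩ := ih (k + 1) h
      refine ⟨m + 1, by simpa using hm, ?_⟩
      rw [hpm]
      simp only [List.getElem_cons_succ, Prod.mk.injEq, true_and]
      push_cast
      ring

theorem pairwise_snd_pairsOf (l : List Int) (k : Int) :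
    (pairsOf l k).Pairwise (fun a b => a.2 < b.2) := by
  induction l generalizing k with
  | nil => exact List.Pairwise.nil
  | cons s t ih =>
    refine List.Pairwise.cons ?_ (ih (k + 1))
    intro p hp
    obtain ⟨m, hm, hpm⟩ := mem_pairsOf t (k + 1) p hp
    rw [hpm]
    simp only
    omega

theorem mem_pairsOf_of_getElem (l : List Int) (k : Int) (m : Nat) (h : m < l.length) :
    (l[m], k + (m : Int)) ∈ pairsOf l k := by
  rw [← getElem_pairsOf l k m h]
  exact List.getElem_mem _

-- min? returns exactly the least value
theorem min?_eq_of_isLeast (sums : List Int) (s : Int) (hmem : s ∈ sums)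
    (hle : ∀ y ∈ sums, s ≤ y) : PySem.List.min? sums (fun y => y) = some s := by
  cases hq : PySem.List.min? sums (fun y => y) with
  | none =>
    rw [PySem.List.min?_eq_none_iff] at hq
    subst hq; simp at hmem
  | some m =>
    have h1 := PySem.List.min?_mem hq
    have h2 := PySem.List.min?_isMin hq s hmem
    have h3 := hle m h1
    simp only [Option.some_inj]
    omega

theorem index?_eq_of_first (sums : List Int) (s : Int) (k : Nat) (hk : k < sums.length)
    (hget : sums[k] = s) (hmin : ∀ j : Nat, j < k → ∀ hj : j < sums.length, sums[j] ≠ s) :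
    PySem.List.index? sums s = some k := by
  rw [PySem.List.index?_eq_some_iff]
  refine ⟨sums.take k, sums.drop (k + 1), ?_, by simp [List.length_take]; omega, ?_⟩
  · conv_lhs => rw [← List.take_append_drop k sums, ← List.getElem_cons_drop (as := sums) (i := k) (h := hk)]
    rw [hget]
  · intro hmem
    obtain ⟨j, hj, hjs⟩ := List.mem_iff_getElem.mp hmem
    rw [List.getElem_take] at hjs
    have hjk : j < k := by simp [List.length_take] at hj; omega
    exact hmin j hjk (by omega) hjs

-- insAsc is a permutation-respecting insert
theorem insAsc_perm (l : List (Int × Int)) (p : Int × Int) : (insAsc l p).Perm (p :: l) := by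
  induction l with
  | nil => simp [insAsc]
  | cons q qs ih =>
    simp only [insAsc]
    split
    · exact (ih.cons q).trans (List.Perm.swap p q qs)
    · exact List.Perm.refl _

theorem pairLt_trans (a b c : Int × Int) (h1 : pairLt a b = true) (h2 : pairLt b c = true) :
    pairLt a c = true := by
  simp only [pairLt, Bool.or_eq_true, Bool.and_eq_true, decide_eq_true_eq, beq_iff_eq] at *
  omega

theorem pairLt_total_ne (p q : Int × Int) (hne : q.2 ≠ p.2) (h : ¬ pairLt q p = true) :
    pairLt p q = true := by
  simp only [pairLt, Bool.or_eq_true, Bool.and_eq_true, decide_eq_true_eq, beq_iff_eq] at *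
  omega

theorem insAsc_pairwise (l : List (Int × Int)) (p : Int × Int)
    (hl : l.Pairwise (fun a b => pairLt a b = true))
    (hne : ∀ q ∈ l, q.2 ≠ p.2) :
    (insAsc l p).Pairwise (fun a b => pairLt a b = true) := by
  induction l with
  | nil => simp [insAsc]
  | cons q qs ih =>
    rcases List.pairwise_cons.mp hl with ⟨hq, hqs⟩
    simp only [insAsc]
    split
    · next hlt =>
      refine List.pairwise_cons.mpr ⟨?_, ih hqs (fun r hr => hne r (List.mem_cons_of_mem q hr))⟩
      intro r hr
      have := (insAsc_perm qs p).mem_iff.mp hr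
      rcases List.mem_cons.mp this with h | h
      · subst h; exact hlt
      · exact hq r h
    · next hnlt =>
      have hpq : pairLt p q = true :=
        pairLt_total_ne p q (hne q List.mem_cons_self) hnlt
      refine List.pairwise_cons.mpr ⟨?_, hl⟩
      intro r hr
      rcases List.mem_cons.mp hr with h | h
      · subst h; exact hpq
      · exact pairLt_trans p q r hpq (hq r h)

-- the main loop invariant
theorem main_loop (xs : List Int) :
    ∀ (result : List (List Int)) (sums : List Int) (queue : List (Int × Int)),
    sums ≠ [] →
    queue.Perm (pairsOf sums 0) →
    queue.Pairwise (fun a b => pairLt a b = true) →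
    (xs.foldl stepA (result, sums)).1 = (xs.foldl stepB (result, queue)).1 := by
  induction xs with
  | nil => intro result sums queue _ _ _; rfl
  | cons x xs ih =>
    intro result sums queue hne hperm hpw
    have hq : queue ≠ [] := by
      intro hqnil
      apply hne
      have := hperm.length_eq
      rw [hqnil, length_pairsOf] at this
      exact List.eq_nil_of_length_eq_zero this.symm
    obtain ⟨⟨s, i⟩, rest, rfl⟩ := List.exists_cons_of_ne_nil hq
    have hmemP : (s, i) ∈ pairsOf sums 0 := hperm.mem_iff.mp List.mem_cons_self
    obtain ⟨k, hk, hpk⟩ := mem_pairsOf sums 0 (s, i) hmemP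
    have hs : sums[k] = s := by simpa using congrArg Prod.fst hpk.symm
    have hi : i = (k : Int) := by simpa using congrArg Prod.snd hpk
    have hpwhead := (List.pairwise_cons.mp hpw).1
    have hpwtail := (List.pairwise_cons.mp hpw).2
    -- s is the minimum value of sums
    have hminval : ∀ y ∈ sums, s ≤ y := by
      intro y hy
      obtain ⟨m, hm, hym⟩ := List.mem_iff_getElem.mp hy
      have hmem2 : (y, (m : Int)) ∈ pairsOf sums 0 := by
        have := mem_pairsOf_of_getElem sums 0 m hm
        rw [hym] at this
        simpa using this
      have hqmem : (y, (m : Int)) ∈ (s, i) :: rest := hperm.mem_iff.mpr hmem2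
      rcases List.mem_cons.mp hqmem with h | h
      · have : y = s := by simpa using congrArg Prod.fst h
        omega
      · have := hpwhead _ h
        simp only [pairLt, Bool.or_eq_true, Bool.and_eq_true, decide_eq_true_eq, beq_iff_eq] at this
        omega
    -- k is the first index achieving it
    have hfirst : ∀ j : Nat, j < k → ∀ hj : j < sums.length, sums[j] ≠ s := by
      intro j hjk hj hcon
      have hmemj : (s, (j : Int)) ∈ pairsOf sums 0 := by
        have := mem_pairsOf_of_getElem sums 0 j hj
        rw [hcon] at this
        simpa using this
      have hqmem : (s, (j : Int)) ∈ (s, i) :: rest := hperm.mem_iff.mpr hmemj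
      rcases List.mem_cons.mp hqmem with h | h
      · have : (j : Int) = i := by simpa using congrArg Prod.snd h
        omega
      · have := hpwhead _ h
        simp only [pairLt, Bool.or_eq_true, Bool.and_eq_true, decide_eq_true_eq, beq_iff_eq] at this
        omega
    -- evaluate the two step functions
    have hA : stepA (result, sums) x
        = (result.set k (result.getD k [] ++ [x]), sums.set k (s + x)) := by
      unfold stepA
      simp only
      rw [min?_eq_of_isLeast sums s (hs ▸ List.getElem_mem hk) hminval]
      simp only [Option.getD_some]
      rw [index?_eq_of_first sums s k hk hs hfirst]
      simp only [Option.getD_some]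
      rw [List.getD_eq_getElem sums 0 hk, hs]
    have hB : stepB (result, (s, i) :: rest) x
        = (result.set k (result.getD k [] ++ [x]), insAsc rest (s + x, i)) := by
      simp [stepB, hi]
    -- the snd components of the queue are distinct
    have hsndnodup : (((s, i) :: rest).map Prod.snd).Nodup := by
      refine (hperm.map Prod.snd).nodup_iff.mpr ?_
      have := pairwise_snd_pairsOf sums 0
      exact (this.map Prod.snd (fun a b h => h)).imp ne_of_lt
    have hrestne : ∀ q ∈ rest, q.2 ≠ i := by
      intro q hqr hqi
      have : i ∉ rest.map Prod.snd := by
        simpa using (List.nodup_cons.mp hsndnodup).1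
      exact this (hqi ▸ List.mem_map_of_mem hqr)
    -- the new queue is a sorted permutation of the new pairs
    have hP : pairsOf (sums.set k (s + x)) 0 = (pairsOf sums 0).set k (s + x, (k : Int)) := by
      rw [pairsOf_set]
      simp
    have hkP : k < (pairsOf sums 0).length := by rw [length_pairsOf]; exact hk
    have hPdecomp : pairsOf sums 0
        = (pairsOf sums 0).take k ++ (s, (k : Int)) :: (pairsOf sums 0).drop (k + 1) := by
      conv_lhs => rw [← List.take_append_drop k (pairsOf sums 0),
        ← List.getElem_cons_drop (as := pairsOf sums 0) (i := k) (h := hkP)]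
      rw [getElem_pairsOf sums 0 k hk, hs]
      simp
    have hPset : (pairsOf sums 0).set k (s + x, (k : Int))
        = (pairsOf sums 0).take k ++ (s + x, (k : Int)) :: (pairsOf sums 0).drop (k + 1) := by
      have hlen : ((pairsOf sums 0).take k).length = k := by
        simp [List.length_take]
        omega
      conv_lhs => rw [hPdecomp]
      rw [List.set_append]
      simp [hlen]
    have hrestperm : rest.Perm ((pairsOf sums 0).take k ++ (pairsOf sums 0).drop (k + 1)) := by
      have h0 : (pairsOf sums 0).Perm
          ((pairsOf sums 0).take k ++ (s, (k : Int)) :: (pairsOf sums 0).drop (k + 1)) := by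
        rw [← hPdecomp]
      have h1 : ((s, (k : Int)) :: rest).Perm
          ((s, (k : Int)) :: ((pairsOf sums 0).take k ++ (pairsOf sums 0).drop (k + 1))) :=
        (hi ▸ hperm).trans (h0.trans List.perm_middle)
      exact h1.cons_inv
    have hnewperm : (insAsc rest (s + x, i)).Perm (pairsOf (sums.set k (s + x)) 0) := by
      rw [hP, hPset]
      refine (insAsc_perm rest (s + x, i)).trans ?_
      rw [hi]
      exact (hrestperm.cons _).trans List.perm_middle.symm
    have hnewpw : (insAsc rest (s + x, i)).Pairwise (fun a b => pairLt a b = true) :=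
      insAsc_pairwise rest (s + x, i) hpwtail (by simpa using hrestne)
    have hnewne : sums.set k (s + x) ≠ [] := by
      intro h
      have := congrArg List.length h
      simp only [List.length_set, List.length_nil] at this
      exact hne (List.eq_nil_of_length_eq_zero this)
    simp only [List.foldl_cons, hA, hB]
    exact ih _ _ _ hnewne hnewperm hnewpw

-- unfolding A's init loop
theorem initA_eq (l : List Int) (acc : List (List Int) × List Int) :
    l.foldl (fun (st : List (List Int) × List Int) _ => (st.1 ++ [([] : List Int)], st.2 ++ [(0 : Int)])) acc
      = (acc.1 ++ l.map (fun _ => []), acc.2 ++ l.map (fun _ => 0)) := by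
  induction l generalizing acc with
  | nil => simp
  | cons a t ih => simp [ih]

theorem pairsOf_init_aux (n : Nat) : ∀ (a b : Int), (b - a).toNat = n →
    pairsOf ((PySem.List.pyRange a b 1).map (fun _ => 0)) a
      = (PySem.List.pyRange a b 1).map (fun i => ((0 : Int), i)) := by
  induction n with
  | zero =>
    intro a b h
    rw [PySem.List.pyRange_one_eq_nil (by omega)]
    rfl
  | succ n ih =>
    intro a b h
    rw [PySem.List.pyRange_one_cons (by omega)]
    simp only [List.map_cons, pairsOf]
    rw [ih (a + 1) b (by omega)]

theorem pairsOf_init (a b : Int) :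
    pairsOf ((PySem.List.pyRange a b 1).map (fun _ => 0)) a
      = (PySem.List.pyRange a b 1).map (fun i => ((0 : Int), i)) :=
  pairsOf_init_aux (b - a).toNat a b rfl

-- ===== VERDICT (by name: the statement is the Claim_ definition above) =====
theorem find_min_diff_ribbons_spec : Claim_equal_find_min_diff_ribbons := by
  intro lists num _ hpre
  unfold Spec_find_min_diff_ribbons find_min_diff_ribbons find_min_diff_ribbons_alt
  simp only [initA_eq, List.nil_append]
  rcases hpre with hnum | hnil
  · apply main_loop
    · intro h
      have := congrArg List.length h
      simp only [List.length_map, PySem.List.length_pyRange_one, List.length_nil] at this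
      omega
    · rw [pairsOf_init 0 num]
    · refine List.Pairwise.map _ ?_ (PySem.List.pairwise_lt_pyRange_one 0 num)
      intro a b hab
      simp only [pairLt]
      simp only [Bool.or_eq_true, Bool.and_eq_true, decide_eq_true_eq, beq_iff_eq]
      exact Or.inr ⟨trivial, hab⟩
  · subst hnil
    rfl
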